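-- pv_equiv track=rewrite | github.com/nifemiojo/Challenges | retailStore_dataScience/solution.py | best_and_worst_hour
-- ===== SOURCE A (Python) =====
-- def formatTimeString(time):
--
--     newTime = time + ":00"
--
--     return newTime
--
-- def best_and_worst_hour(percentages):
--
--     filteredList = [x for x in percentages.items() if x[1] > 0]
--
--     worstval = min(percentages.items(), key=lambda x: x[1])
--     bestval = min(filteredList, key=lambda x: x[1])
--
--     bestHour = formatTimeString(bestval[0])
--     worstHour = formatTimeString(worstval[0])
--
--     bestAndWorstHour = [bestHour, worstHour]
--
--     return bestAndWorstHour
-- ===== SOURCE B (Python) =====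
-- def best_and_worst_hour(percentages):
--     # One pass: keep the running worst (min over all) and best (min over
--     # positive values), strict '<' so the first occurrence wins on ties.
--     worst = None
--     best = None
--     for hour, pct in percentages.items():
--         if worst is None or pct < worst[1]:
--             worst = (hour, pct)
--         if pct > 0 and (best is None or pct < best[1]):
--             best = (hour, pct)
--     if worst is None or best is None:
--         raise ValueError("min() arg is an empty sequence")
--     return [best[0] + ":00", worst[0] + ":00"]
-- ===== Notes on version B (the rewrite author's own statement) =====
-- stated objective: alternative
-- what changed: Replaces the build-a-filtered-list-plus-two-min()-scans with a single explicit pass over percentages.items() that maintains both running selections (worst over all items, best over positive items) in one loop.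
import Mathlib
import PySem

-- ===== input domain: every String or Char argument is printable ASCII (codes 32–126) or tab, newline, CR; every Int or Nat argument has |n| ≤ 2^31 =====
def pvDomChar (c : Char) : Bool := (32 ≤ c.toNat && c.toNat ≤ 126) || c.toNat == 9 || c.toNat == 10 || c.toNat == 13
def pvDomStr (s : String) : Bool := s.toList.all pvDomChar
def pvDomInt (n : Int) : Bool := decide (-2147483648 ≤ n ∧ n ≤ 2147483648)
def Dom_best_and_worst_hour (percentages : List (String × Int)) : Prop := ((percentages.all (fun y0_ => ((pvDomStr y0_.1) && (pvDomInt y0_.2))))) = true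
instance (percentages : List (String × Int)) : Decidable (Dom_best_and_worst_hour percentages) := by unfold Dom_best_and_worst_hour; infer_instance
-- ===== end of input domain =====

-- B replaces A's filtered-list + two min() scans by one explicit loop keeping both running minima (alternative decomposition, same cost).


-- ===== PORT A =====
-- time + ":00" (string concatenation, done on the List Char side so the kernel can unfold it)
def formatTimeString (time : String) : String := String.ofList (time.toList ++ (":00").toList)

def best_and_worst_hour (percentages : List (String × Int)) : List String :=
  let items := (PySem.Dict.ofList percentages).items
  let filteredList := items.filter (fun x => decide (0 < x.2))
  -- min(..., key=lambda x: x[1]); Python raises ValueError on an empty sequence (min? = none), excluded by Pre_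
  match PySem.List.min? items (fun x => x.2), PySem.List.min? filteredList (fun x => x.2) with
  | some worstval, some bestval =>
      let bestHour := formatTimeString bestval.1
      let worstHour := formatTimeString worstval.1
      [bestHour, worstHour]
  | _, _ => []   -- unreachable under Pre_ (Python raises ValueError here)

-- ===== PORT B =====
-- one fold step: update the running (worst, best) pair exactly as Source B's loop body does
def bwStep (st : Option (String × Int) × Option (String × Int)) (p : String × Int) :
    Option (String × Int) × Option (String × Int) :=
  let worst := match st.1 with
    | none => some p
    | some w => if p.2 < w.2 then some p else some w
  let best := if 0 < p.2 then
      match st.2 with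
      | none => some p
      | some b => if p.2 < b.2 then some p else some b
    else st.2
  (worst, best)

def best_and_worst_hour_alt (percentages : List (String × Int)) : List String :=
  let st := (PySem.Dict.ofList percentages).items.foldl bwStep (none, none)
  -- Source B: 'if worst is None or best is None: raise ValueError' — unreachable under Pre_
  match st.1 with
  | none => []
  | some worst =>
    match st.2 with
    | none => []
    | some best => [String.ofList (best.1.toList ++ [':', '0', '0']), String.ofList (worst.1.toList ++ [':', '0', '0'])]

-- ===== PRECONDITION & SPEC =====
-- Pre_ excludes exactly the inputs on which A raises ValueError (min() of an empty
-- sequence): the dict is empty, or it holds no strictly positive value.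
def Pre_best_and_worst_hour (percentages : List (String × Int)) : Prop :=
  ((PySem.Dict.ofList percentages).items.any (fun p => decide (0 < p.2))) = true
instance (percentages : List (String × Int)) : Decidable (Pre_best_and_worst_hour percentages) := by unfold Pre_best_and_worst_hour; infer_instance
def pvWitness_best_and_worst_hour : (List (String × Int)) := [("10", 5), ("11", -2)]

def Spec_best_and_worst_hour (percentages : List (String × Int)) (out : List String) : Prop := out = best_and_worst_hour_alt percentages
instance (percentages : List (String × Int)) (out : List String) : Decidable (Spec_best_and_worst_hour percentages out) := by unfold Spec_best_and_worst_hour; infer_instance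

-- ===== CLAIM (what is proved, stated in full; the proofs are below) =====
def Claim_equal_best_and_worst_hour : Prop := ∀ (percentages : List (String × Int)), Dom_best_and_worst_hour percentages → Pre_best_and_worst_hour percentages → Spec_best_and_worst_hour percentages (best_and_worst_hour percentages)

-- ===== LEMMAS AND PROOFS =====

-- B's single fold computes, componentwise, the first-occurrence minimum over all
-- items and over the positive items: exactly A's two min? computations.
theorem bwStep_foldl (l : List (String × Int))
    (w b : Option (String × Int)) :
    l.foldl bwStep (w, b) =
      (l.foldl (fun acc x => match acc with
          | none => some x
          | some m => if x.2 < m.2 then some x else some m) w,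
       (l.filter (fun x => decide (0 < x.2))).foldl (fun acc x => match acc with
          | none => some x
          | some m => if x.2 < m.2 then some x else some m) b) := by
  induction l generalizing w b with
  | nil => rfl
  | cons p t ih =>
      simp only [List.foldl_cons, List.filter_cons]
      by_cases hp : (0 : Int) < p.2
      · simp only [hp, decide_true, if_true, List.foldl_cons]
        rw [show bwStep (w, b) p = (match w with
            | none => some p
            | some m => if p.2 < m.2 then some p else some m,
            match b with
            | none => some p
            | some m => if p.2 < m.2 then some p else some m) by
          simp [bwStep, hp]]
        exact ih _ _
      · simp only [hp, decide_false]
        rw [show bwStep (w, b) p = (match w with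
            | none => some p
            | some m => if p.2 < m.2 then some p else some m, b) by
          simp [bwStep, hp]]
        exact ih _ _

theorem min?_eq_bwfold (l : List (String × Int)) :
    PySem.List.min? l (fun x => x.2) =
      l.foldl (fun acc x => match acc with
          | none => some x
          | some m => if x.2 < m.2 then some x else some m) none := by
  unfold PySem.List.min?
  congr 1
  funext acc x
  rcases acc <;> rfl

theorem bw_foldl_eq_min? (l : List (String × Int)) :
    l.foldl bwStep (none, none) =
      (PySem.List.min? l (fun x => x.2),
       PySem.List.min? (l.filter (fun x => decide (0 < x.2))) (fun x => x.2)) := by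
  rw [bwStep_foldl, min?_eq_bwfold, min?_eq_bwfold]

-- ===== VERDICT (by name: the statement is the Claim_ definition above) =====
theorem best_and_worst_hour_spec : Claim_equal_best_and_worst_hour := by
  intro percentages _ hpre
  unfold Spec_best_and_worst_hour best_and_worst_hour best_and_worst_hour_alt
  rw [bw_foldl_eq_min?]
  set items := (PySem.Dict.ofList percentages).items with hitems
  have hfil : items.filter (fun x => decide (0 < x.2)) ≠ [] := by
    unfold Pre_best_and_worst_hour at hpre
    rw [← hitems] at hpre
    obtain ⟨p, hmem, hpos⟩ := List.any_eq_true.mp hpre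
    intro hnil
    exact (List.filter_eq_nil_iff.mp hnil p hmem) hpos
  have hne : items ≠ [] := by
    intro h; exact hfil (by simp [h])
  obtain ⟨w, hw⟩ := Option.ne_none_iff_exists'.mp
    (fun h => hne ((PySem.List.min?_eq_none_iff items (fun x => x.2)).mp h))
  obtain ⟨b, hb⟩ := Option.ne_none_iff_exists'.mp
    (fun h => hfil ((PySem.List.min?_eq_none_iff _ (fun x => x.2)).mp h))
  simp only [hw, hb]
  rfl
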